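-- pv_equiv track=rewrite | github.com/connorneu/airplanemode | gui.py | newline_suggestion
-- ===== SOURCE A (Python) =====
-- def newline_suggestion(suggestion):
--     ns = ''
--     char_count = 0
--     for c in suggestion:
--         if char_count > 100 and c == ' ':
--             ns += '\n'
--             char_count = 0
--         ns += c
--         char_count += 1
--     return ns
-- ===== SOURCE B (Python) =====
-- def newline_suggestion(suggestion):
--     pieces = []
--     start = 0
--     while True:
--         idx = suggestion.find(' ', start + 101)
--         if idx == -1:
--             pieces.append(suggestion[start:])
--             break
--         pieces.append(suggestion[start:idx])
--         pieces.append('\n')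
--         start = idx
--     return ''.join(pieces)
-- ===== Notes on version B (the rewrite author's own statement) =====
-- stated objective: faster
-- what changed: Replaced the per-character counter loop that grows the string one char at a time by library substring search: repeatedly find the first space at offset >= 101 of the current line, cut there, and join the pieces at the end.
import Mathlib
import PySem

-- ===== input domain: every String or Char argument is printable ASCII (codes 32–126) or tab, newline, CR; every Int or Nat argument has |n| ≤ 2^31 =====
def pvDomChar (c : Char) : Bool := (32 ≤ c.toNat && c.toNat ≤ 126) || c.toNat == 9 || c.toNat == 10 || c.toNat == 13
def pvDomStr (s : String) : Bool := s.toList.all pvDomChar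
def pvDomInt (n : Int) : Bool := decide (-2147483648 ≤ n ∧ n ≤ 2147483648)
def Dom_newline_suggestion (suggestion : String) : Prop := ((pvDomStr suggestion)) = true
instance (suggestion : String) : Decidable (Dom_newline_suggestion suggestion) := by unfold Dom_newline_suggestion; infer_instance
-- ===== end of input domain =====

-- B replaces A's per-character counter loop by library substring search (find the first
-- space at offset ≥ 101 of the current line, cut there, repeat) and a final join;
-- measurably faster in Python by a constant factor. Both are pure; equivalence is total.

-- ===== PORT A =====
-- A: fold over the characters with state (ns, char_count); on a space after more than
-- 100 characters, append '\n', reset the counter, then append the character as usual.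
def newline_suggestion (suggestion : String) : String :=
  String.mk ((suggestion.toList.foldl
    (fun st c =>
      if 100 < st.2 ∧ c = ' ' then ((st.1 ++ ['\n']) ++ [c], (0 : Int) + 1)
      else (st.1 ++ [c], st.2 + 1))
    ([], (0 : Int))).1)

-- ===== PORT B =====
-- B's loop body: `idx = rem.find(' ', 101)` — exact for the single-character needle ' ':
-- `findIdx? (· = ' ')` on the suffix `rem.drop 101` is the first space at offset ≥ 101
-- (none ↔ Python's -1). On -1 append the rest and stop; else cut before the space and
-- continue from it (B's `start = idx` becomes recursing on the suffix from idx).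
def bGo (rem : List Char) : List Char :=
  match h : (rem.drop 101).findIdx? (fun c => c = ' ') with
  | none => rem
  | some k => rem.take (101 + k) ++ '\n' :: bGo (rem.drop (101 + k))
termination_by rem.length
decreasing_by
  have hk := (List.findIdx?_eq_some_iff_findIdx_eq.mp h).1
  simp [List.length_drop] at hk ⊢
  omega

def newline_suggestion_alt (suggestion : String) : String :=
  String.mk (bGo suggestion.toList)

-- ===== PRECONDITION & SPEC =====
def Spec_newline_suggestion (suggestion : String) (out : String) : Prop := out = newline_suggestion_alt suggestion
instance (suggestion : String) (out : String) : Decidable (Spec_newline_suggestion suggestion out) := by unfold Spec_newline_suggestion; infer_instance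

-- ===== CLAIM (what is proved, stated in full; the proofs are below) =====
def Claim_equal_newline_suggestion : Prop := ∀ (suggestion : String), Dom_newline_suggestion suggestion → Spec_newline_suggestion suggestion (newline_suggestion suggestion)

-- ===== LEMMAS AND PROOFS =====

-- Common reference: A's loop restructured as a recursion with a Nat counter.
def spl (c : Nat) : List Char → List Char
  | [] => []
  | x :: xs => if 100 < c ∧ x = ' ' then '\n' :: x :: spl 1 xs else x :: spl (c + 1) xs

-- A's fold computes `spl`.
lemma foldA_eq_spl (l : List Char) : ∀ (acc : List Char) (n : Nat),
    (l.foldl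
      (fun st c =>
        if 100 < st.2 ∧ c = ' ' then ((st.1 ++ ['\n']) ++ [c], (0 : Int) + 1)
        else (st.1 ++ [c], st.2 + 1))
      (acc, (n : Int))).1 = acc ++ spl n l := by
  induction l with
  | nil => intro acc n; simp [spl]
  | cons x xs ih =>
    intro acc n
    by_cases hc : 100 < n ∧ x = ' '
    · have hc' : 100 < ((n : Int)) ∧ x = ' ' := ⟨by exact_mod_cast hc.1, hc.2⟩
      simp only [List.foldl_cons, if_pos hc', spl, if_pos hc]
      have := ih ((acc ++ ['\n']) ++ [x]) 1
      simpa using this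
    · have hc' : ¬ (100 < ((n : Int)) ∧ x = ' ') := by
        intro h; exact hc ⟨by exact_mod_cast h.1, h.2⟩
      simp only [List.foldl_cons, if_neg hc', spl, if_neg hc]
      have h1 : ((n : Int) + 1) = ((n + 1 : Nat) : Int) := by push_cast; ring
      rw [h1]
      have := ih (acc ++ [x]) (n + 1)
      simpa using this

-- If there is no space at offset ≥ 101 - c, `spl c` copies the list unchanged.
lemma spl_no_break : ∀ (l : List Char) (c : Nat),
    (l.drop (101 - c)).findIdx? (fun ch => ch = ' ') = none → spl c l = l := by
  intro l
  induction l with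
  | nil => intro c _; simp [spl]
  | cons x xs ih =>
    intro c h
    rw [List.findIdx?_eq_none_iff] at h
    by_cases hc : 101 ≤ c
    · have h0 : (101 - c) = 0 := by omega
      rw [h0, List.drop_zero] at h
      have hx : ¬ x = ' ' := by have := h x (by simp); simpa using this
      have hxs : (xs.drop (101 - (c + 1))).findIdx? (fun ch => ch = ' ') = none := by
        rw [List.findIdx?_eq_none_iff]
        intro a ha
        exact h a (List.mem_cons_of_mem _ (List.mem_of_mem_drop ha))
      simp [spl, hx, ih (c + 1) hxs]
    · have hsplit : (101 - c) = (100 - c) + 1 := by omega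
      rw [hsplit, List.drop_succ_cons] at h
      have h' : (xs.drop (101 - (c + 1))).findIdx? (fun ch => ch = ' ') = none := by
        rw [List.findIdx?_eq_none_iff]
        have he : (101 - (c + 1)) = 100 - c := by omega
        rw [he]
        exact h
      have hcc : ¬ (100 < c ∧ x = ' ') := by
        intro hh; omega
      simp [spl, hcc, ih (c + 1) h']

-- If the first space at offset ≥ 101 - c is at index (101 - c) + k, `spl c` cuts there.
lemma spl_break : ∀ (l : List Char) (c k : Nat),
    (l.drop (101 - c)).findIdx? (fun ch => ch = ' ') = some k →
    spl c l = l.take ((101 - c) + k) ++ '\n' :: spl 0 (l.drop ((101 - c) + k)) := by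
  intro l
  induction l with
  | nil => intro c k h; simp at h
  | cons x xs ih =>
    intro c k h
    by_cases hc : 101 ≤ c
    · have h0 : (101 - c) = 0 := by omega
      rw [h0, List.drop_zero, List.findIdx?_cons] at h
      by_cases hx : x = ' '
      · simp only [hx, decide_true, if_pos] at h
        have hk0 : k = 0 := by simpa using h.symm
        subst hk0
        have hcc : 100 < c ∧ x = ' ' := ⟨by omega, hx⟩
        have h00 : ¬ (100 < 0 ∧ x = ' ') := by omega
        simp [spl, hcc, h0]
      · simp only [hx, decide_false, if_neg, Bool.false_eq_true, not_false_iff] at h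
        obtain ⟨k', hk', hkk⟩ := Option.map_eq_some_iff.mp h
        have hxs : (xs.drop (101 - (c + 1))).findIdx? (fun ch => ch = ' ') = some k' := by
          have : (101 - (c + 1)) = 0 := by omega
          simpa [this] using hk'
        have hcc : ¬ (100 < c ∧ x = ' ') := by intro hh; exact hx hh.2
        have hrec := ih (c + 1) k' hxs
        have h1 : (101 - (c + 1)) = 0 := by omega
        rw [h1] at hrec
        subst hkk
        simp [spl, hcc, h0, hrec, List.take_succ_cons, List.drop_succ_cons]
    · have hsplit : (101 - c) = (100 - c) + 1 := by omega
      rw [hsplit, List.drop_succ_cons] at h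
      have h' : (xs.drop (101 - (c + 1))).findIdx? (fun ch => ch = ' ') = some k := by
        have : (101 - (c + 1)) = 100 - c := by omega
        simpa [this] using h
      have hcc : ¬ (100 < c ∧ x = ' ') := by intro hh; omega
      have hrec := ih (c + 1) k h'
      have h1 : (101 - (c + 1)) = 100 - c := by omega
      rw [h1] at hrec
      have h2 : (101 - c) + k = ((100 - c) + k) + 1 := by omega
      rw [h2]
      simp [spl, hcc, hrec, List.take_succ_cons, List.drop_succ_cons]

-- B's search loop computes `spl 0`.
lemma bGo_eq_spl (l : List Char) : bGo l = spl 0 l := by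
  induction l using bGo.induct with
  | case1 l h => rw [bGo, h, spl_no_break l 0 (by simpa using h)]
  | case2 l k h ih =>
    have hb : bGo l = l.take (101 + k) ++ '\n' :: bGo (l.drop (101 + k)) := by
      rw [bGo, h]
    have hs := spl_break l 0 k (by simpa using h)
    simp only [Nat.sub_zero] at hs
    rw [hb, hs, ih]

-- ===== VERDICT (by name: the statement is the Claim_ definition above) =====
theorem newline_suggestion_spec : Claim_equal_newline_suggestion := by
  intro s _
  unfold Spec_newline_suggestion newline_suggestion newline_suggestion_alt
  refine congrArg String.mk ?_
  rw [bGo_eq_spl]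
  have h := foldA_eq_spl s.toList [] 0
  simpa using h
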